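-- pv_equiv track=rewrite | github.com/PulkitChadha125/PREDICTION_MARKET | discover_cme_conids_from_csv.py | _itc_prefix
-- ===== SOURCE A (Python) =====
-- def _itc_prefix(value: str) -> str:
--     """Extract product code from ITCCode like 'ECD10J622 C5000' -> 'ECD10'."""
--     token = (value or "").strip().split(" ", 1)[0].upper()
--     if not token:
--         return ""
--     prefix = []
--     for char in token:
--         if char.isalpha() or char.isdigit():
--             prefix.append(char)
--             continue
--         break
--     text = "".join(prefix)
--     # Drop trailing expiry chunk after first month code letter if present.
--     # Example ECD10J622 -> ECD10
--     for idx, char in enumerate(text):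
--         if idx >= 3 and char in "FGHJKMNQUVXZ":
--             return text[:idx]
--     return text
-- ===== SOURCE B (Python) =====
-- def _itc_prefix(value: str) -> str:
--     """Single pass over the token: stop at the first non-alphanumeric char,
--     or return early at the first month-code letter at index >= 3."""
--     token = (value or "").strip().split(" ", 1)[0].upper()
--     out = ""
--     for ch in token:
--         if not (ch.isalpha() or ch.isdigit()):
--             break
--         if len(out) >= 3 and ch in "FGHJKMNQUVXZ":
--             return out
--         out += ch
--     return out
-- ===== Notes on version B (the rewrite author's own statement) =====
-- stated objective: simpler
-- what changed: Replaced A's two sequential passes (collect the full alphanumeric prefix, then re-scan it with enumerate to cut at the first month letter at index >= 3) by one pass over the token that maintains only the running prefix and returns early, dropping the empty-token guard and the intermediate list/join.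
import Mathlib
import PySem

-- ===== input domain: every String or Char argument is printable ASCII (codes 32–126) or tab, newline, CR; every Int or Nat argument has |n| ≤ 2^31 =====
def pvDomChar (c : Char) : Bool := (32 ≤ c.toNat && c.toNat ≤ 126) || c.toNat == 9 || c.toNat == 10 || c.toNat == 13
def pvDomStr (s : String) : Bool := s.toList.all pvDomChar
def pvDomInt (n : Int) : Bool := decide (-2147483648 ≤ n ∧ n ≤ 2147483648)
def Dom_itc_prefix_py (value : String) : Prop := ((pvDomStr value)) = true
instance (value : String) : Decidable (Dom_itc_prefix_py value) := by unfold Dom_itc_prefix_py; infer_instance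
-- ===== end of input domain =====

-- B changes the decomposition only (one early-exit pass instead of two passes); same O(n) cost.

-- ===== PORT A =====
-- token = (value or "").strip().split(" ", 1)[0].upper()  ('value or ""' is 'value' for str)
def itcA_token (value : String) : List Char :=
  PySem.Chars.upper ((PySem.Chars.splitOnMax (PySem.Chars.strip value.toList) [' '] 1).headD [])

-- first loop: append alphanumeric chars, break at the first other char
def itcA_prefixLoop : List Char → List Char
  | [] => []
  | c :: rest =>
      if PySem.Chars.isalpha c || PySem.Chars.isdigit c then c :: itcA_prefixLoop rest
      else []

-- second loop: for idx, char in enumerate(text): if idx >= 3 and char in "FGHJKMNQUVXZ": return text[:idx]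
def itcA_scan (text : List Char) (idx : Nat) : List Char → List Char
  | [] => text
  | c :: rest =>
      if decide (3 ≤ idx) && PySem.Chars.isIn [c] "FGHJKMNQUVXZ".toList then
        PySem.List.slice text none (some (idx : Int))
      else itcA_scan text (idx + 1) rest

def itc_prefix_py (value : String) : String :=
  let token := itcA_token value
  if token = [] then ""
  else
    let text := itcA_prefixLoop token
    String.ofList (itcA_scan text 0 text)

-- ===== PORT B =====
def itcB_token (value : String) : List Char :=
  PySem.Chars.upper ((PySem.Chars.splitOnMax (PySem.Chars.strip value.toList) [' '] 1).headD [])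

-- single pass: break on non-alnum, early return at a month letter once len(out) >= 3, else append
def itcB_loop (out : List Char) : List Char → List Char
  | [] => out
  | c :: rest =>
      if !(PySem.Chars.isalpha c || PySem.Chars.isdigit c) then out
      else if decide (3 ≤ out.length) && PySem.Chars.isIn [c] "FGHJKMNQUVXZ".toList then out
      else itcB_loop (out ++ [c]) rest

def itc_prefix_py_alt (value : String) : String :=
  String.ofList (itcB_loop [] (itcB_token value))

-- ===== PRECONDITION & SPEC =====
def Spec_itc_prefix_py (value : String) (out : String) : Prop := out = itc_prefix_py_alt value
instance (value : String) (out : String) : Decidable (Spec_itc_prefix_py value out) := by unfold Spec_itc_prefix_py; infer_instance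

-- ===== CLAIM (what is proved, stated in full; the proofs are below) =====
def Claim_equal_itc_prefix_py : Prop := ∀ (value : String), Dom_itc_prefix_py value → Spec_itc_prefix_py value (itc_prefix_py value)

-- ===== LEMMAS AND PROOFS =====

-- common reference function: what both loops compute from the token, parameterised by current length
def itcF (n : Nat) : List Char → List Char
  | [] => []
  | c :: rest =>
      if !(PySem.Chars.isalpha c || PySem.Chars.isdigit c) then []
      else if decide (3 ≤ n) && PySem.Chars.isIn [c] "FGHJKMNQUVXZ".toList then []
      else c :: itcF (n + 1) rest

-- like the enumerate loop of A, but returning only the part after position n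
def itcG (n : Nat) : List Char → List Char
  | [] => []
  | c :: rest =>
      if decide (3 ≤ n) && PySem.Chars.isIn [c] "FGHJKMNQUVXZ".toList then []
      else c :: itcG (n + 1) rest

theorem itcB_loop_eq_itcF (t : List Char) : ∀ pre, itcB_loop pre t = pre ++ itcF pre.length t := by
  induction t with
  | nil => intro pre; simp [itcB_loop, itcF]
  | cons c rest ih =>
      intro pre
      rw [show itcB_loop pre (c :: rest)
            = (if !(PySem.Chars.isalpha c || PySem.Chars.isdigit c) then pre
               else if decide (3 ≤ pre.length) && PySem.Chars.isIn [c] "FGHJKMNQUVXZ".toList then pre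
               else itcB_loop (pre ++ [c]) rest) from rfl]
      rw [show itcF pre.length (c :: rest)
            = (if !(PySem.Chars.isalpha c || PySem.Chars.isdigit c) then []
               else if decide (3 ≤ pre.length) && PySem.Chars.isIn [c] "FGHJKMNQUVXZ".toList then []
               else c :: itcF (pre.length + 1) rest) from rfl]
      by_cases h1 : (!(PySem.Chars.isalpha c || PySem.Chars.isdigit c)) = true
      · rw [if_pos h1, if_pos h1]; simp
      · rw [if_neg h1, if_neg h1]
        by_cases h2 : (decide (3 ≤ pre.length) && PySem.Chars.isIn [c] "FGHJKMNQUVXZ".toList) = true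
        · rw [if_pos h2, if_pos h2]; simp
        · rw [if_neg h2, if_neg h2, ih (pre ++ [c])]
          simp

theorem itcA_scan_eq_itcG (x : List Char) : ∀ s n, s = x.drop n → n ≤ x.length →
    itcA_scan x n s = x.take n ++ itcG n s := by
  intro s
  induction s with
  | nil =>
      intro n hs _
      have hlen : x.length ≤ n := List.drop_eq_nil_iff.mp hs.symm
      simp [itcA_scan, itcG, List.take_of_length_le hlen]
  | cons c rest ih =>
      intro n hs hn
      have hc : x.drop n = c :: rest := hs.symm
      simp only [itcA_scan, itcG]
      by_cases h2 : (decide (3 ≤ n) && PySem.Chars.isIn [c] "FGHJKMNQUVXZ".toList) = true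
      · rw [if_pos h2, if_pos h2]
        rw [PySem.List.slice_to]
        · simp
        · omega
      · rw [if_neg h2, if_neg h2]
        have hn' : n < x.length := by
          by_contra h
          rw [List.drop_eq_nil_of_le (by omega)] at hc
          exact absurd hc (by simp)
        have hget : x[n]? = some c := by
          have h0 : (x.drop n)[0]? = some c := by rw [hc]; rfl
          rwa [List.getElem?_drop, Nat.add_zero] at h0
        have hrest : rest = x.drop (n + 1) := by
          have hd : (x.drop n).drop 1 = rest := by rw [hc]; rfl
          rw [List.drop_drop] at hd
          exact hd.symm
        rw [ih (n + 1) hrest (by omega)]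
        have htake : x.take (n + 1) = x.take n ++ [c] := by
          rw [List.take_succ]
          simp [hget]
        rw [htake]
        simp

theorem itcF_eq_itcG_prefixLoop (t : List Char) : ∀ n, itcF n t = itcG n (itcA_prefixLoop t) := by
  induction t with
  | nil => intro n; simp [itcF, itcA_prefixLoop, itcG]
  | cons c rest ih =>
      intro n
      simp only [itcF, itcA_prefixLoop]
      by_cases h1 : (PySem.Chars.isalpha c || PySem.Chars.isdigit c) = true
      · have hne : ¬ ((!(PySem.Chars.isalpha c || PySem.Chars.isdigit c)) = true) := by simp [h1]
        rw [if_neg hne, if_pos h1]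
        rw [show itcG n (c :: itcA_prefixLoop rest)
              = (if decide (3 ≤ n) && PySem.Chars.isIn [c] "FGHJKMNQUVXZ".toList then []
                 else c :: itcG (n + 1) (itcA_prefixLoop rest)) from rfl]
        by_cases h2 : (decide (3 ≤ n) && PySem.Chars.isIn [c] "FGHJKMNQUVXZ".toList) = true
        · simp only [if_pos h2]
        · simp only [if_neg h2, ih]
      · simp [h1, itcG]

-- ===== VERDICT (by name: the statement is the Claim_ definition above) =====
theorem itc_prefix_py_spec : Claim_equal_itc_prefix_py := by
  intro value _
  unfold Spec_itc_prefix_py itc_prefix_py itc_prefix_py_alt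
  have htok : itcB_token value = itcA_token value := rfl
  rw [htok]
  set t := itcA_token value with ht
  rw [itcB_loop_eq_itcF t []]
  simp only [List.nil_append, List.length_nil]
  by_cases h : t = []
  · rw [if_pos h, h]; rw [show itcF 0 ([]:List Char) = [] from rfl]
  · simp only [if_neg h]
    rw [itcA_scan_eq_itcG (itcA_prefixLoop t) (itcA_prefixLoop t) 0 rfl (Nat.zero_le _)]
    rw [itcF_eq_itcG_prefixLoop t 0]
    simp
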